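-- pv_equiv track=rewrite | github.com/Shreyalg-05/lexihire | engine/debug_extraction.py | merge_section_dicts
-- ===== SOURCE A (Python) =====
-- def merge_section_dicts(sec1, sec2):
--     merged = {}
--
--     all_keys = list(dict.fromkeys(list(sec1.keys()) + list(sec2.keys())))
--
--     for key in all_keys:
--         merged[key] = []
--
--         # left column has priority
--         if key in sec1:
--             merged[key].extend(sec1[key])
--
--         if key in sec2:
--             merged[key].extend(sec2[key])
--
--     return merged
-- ===== SOURCE B (Python) =====
-- def merge_section_dicts(sec1, sec2):
--     out = []
--     pos = {}
--     for key, values in list(sec1.items()) + list(sec2.items()):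
--         if key in pos:
--             i = pos[key]
--             out[i] = (key, out[i][1] + list(values))
--         else:
--             pos[key] = len(out)
--             out.append((key, list(values)))
--     return dict(out)
-- ===== Notes on version B (the rewrite author's own statement) =====
-- stated objective: alternative
-- what changed: Replaces A's key-union-then-lookup scheme (build all_keys by deduplication, then for each key probe both input dicts and extend a dict-of-lists) by a single grouping pass over the concatenated item stream that builds the result as an ordered list of pairs with a key-to-index map (in-place slot update for seen keys, append for new ones), converted to a dict at the end.
import Mathlib
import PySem

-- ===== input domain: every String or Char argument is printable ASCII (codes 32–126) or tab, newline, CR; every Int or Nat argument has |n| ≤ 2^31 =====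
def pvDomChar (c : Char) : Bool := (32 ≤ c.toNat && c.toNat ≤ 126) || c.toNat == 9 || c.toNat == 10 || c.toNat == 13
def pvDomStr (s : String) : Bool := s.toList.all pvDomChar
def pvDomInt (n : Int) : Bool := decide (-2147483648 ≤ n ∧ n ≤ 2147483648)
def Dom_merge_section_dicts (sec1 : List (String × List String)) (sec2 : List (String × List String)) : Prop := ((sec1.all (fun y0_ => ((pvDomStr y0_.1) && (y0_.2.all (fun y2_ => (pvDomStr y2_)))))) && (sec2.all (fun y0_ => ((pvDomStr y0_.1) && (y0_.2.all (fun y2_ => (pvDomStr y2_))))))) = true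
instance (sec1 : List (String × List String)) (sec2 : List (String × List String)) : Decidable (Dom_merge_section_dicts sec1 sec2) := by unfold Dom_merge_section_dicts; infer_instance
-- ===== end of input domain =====

-- B replaces A's key-union-then-lookup scheme by one grouping pass over the concatenated
-- item stream, building the result as an ordered pair list with a key→index map: an
-- alternative decomposition, same values.

-- ===== PORT A =====
def merge_section_dicts (sec1 : List (String × List String)) (sec2 : List (String × List String)) : List (String × List String) :=
  let d1 := PySem.Dict.ofList sec1
  let d2 := PySem.Dict.ofList sec2
  -- all_keys = list(dict.fromkeys(list(sec1.keys()) + list(sec2.keys())))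
  let all_keys := PySem.List.dedup (d1.keys ++ d2.keys)
  (all_keys.foldl (fun merged key =>
      -- merged[key] = []
      let merged := merged.insert key ([] : List String)
      -- if key in sec1: merged[key].extend(sec1[key])   (extend on the existing list)
      let merged := if d1.contains key then merged.modify key [] (fun l => l ++ d1.getD key []) else merged
      -- if key in sec2: merged[key].extend(sec2[key])
      let merged := if d2.contains key then merged.modify key [] (fun l => l ++ d2.getD key []) else merged
      merged)
    PySem.Dict.empty).items

-- ===== PORT B =====
-- loop body: if key in pos: out[pos[key]] = (key, out[pos[key]][1] + list(values))
--            else: pos[key] = len(out); out.append((key, list(values)))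
-- (the getD default is never used: pos only stores in-range indices)
def pvStepB (st : List (String × List String) × PySem.Dict String Nat)
    (p : String × List String) : List (String × List String) × PySem.Dict String Nat :=
  match st.2.get? p.1 with
  | some i => (st.1.set i (p.1, (st.1.getD i (p.1, [])).2 ++ p.2), st.2)
  | none => (st.1 ++ [(p.1, p.2)], st.2.insert p.1 st.1.length)

def merge_section_dicts_alt (sec1 : List (String × List String)) (sec2 : List (String × List String)) : List (String × List String) :=
  let d1 := PySem.Dict.ofList sec1
  let d2 := PySem.Dict.ofList sec2
  -- for key, values in list(sec1.items()) + list(sec2.items()): …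
  let fin := (d1.items ++ d2.items).foldl pvStepB ([], PySem.Dict.empty)
  -- return dict(out)
  (PySem.Dict.ofList fin.1).items

-- ===== PRECONDITION & SPEC =====
def Spec_merge_section_dicts (sec1 : List (String × List String)) (sec2 : List (String × List String)) (out : List (String × List String)) : Prop := out = merge_section_dicts_alt sec1 sec2
instance (sec1 : List (String × List String)) (sec2 : List (String × List String)) (out : List (String × List String)) : Decidable (Spec_merge_section_dicts sec1 sec2 out) := by unfold Spec_merge_section_dicts; infer_instance

-- ===== CLAIM (what is proved, stated in full; the proofs are below) =====
def Claim_equal_merge_section_dicts : Prop := ∀ (sec1 : List (String × List String)) (sec2 : List (String × List String)), Dom_merge_section_dicts sec1 sec2 → Spec_merge_section_dicts sec1 sec2 (merge_section_dicts sec1 sec2)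

-- ===== LEMMAS AND PROOFS =====

-- invariant of B's loop state: keys of out are distinct, pos knows exactly them,
-- and every stored index points at the slot holding its key
def pvInvB (out : List (String × List String)) (pos : PySem.Dict String Nat) : Prop :=
  (out.map Prod.fst).Nodup ∧
  (∀ k, pos.contains k = true ↔ k ∈ out.map Prod.fst) ∧
  (∀ k i, pos.get? k = some i → ∃ h : i < out.length, (out[i]'h).1 = k)

-- on nodup keys, updating the unique slot holding key c is a fst-preserving map
theorem pv_set_extend (v : List String) :
    ∀ (out : List (String × List String)) (i : Nat) (h : i < out.length),
      (out.map Prod.fst).Nodup →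
      out.set i ((out[i]'h).1, (out[i]'h).2 ++ v)
        = out.map (fun q => if q.1 == (out[i]'h).1 then (q.1, q.2 ++ v) else q) := by
  intro out
  induction out with
  | nil => intro i h; simp at h
  | cons a rest ih =>
      intro i h hnd
      cases i with
      | zero =>
          simp only [List.getElem_cons_zero, List.set_cons_zero, List.map_cons,
            beq_self_eq_true, if_pos]
          have : rest.map (fun q => if q.1 == a.1 then (q.1, q.2 ++ v) else q) = rest := by
            conv_rhs => rw [← List.map_id rest]
            apply List.map_congr_left
            intro q hq
            have : q.1 ≠ a.1 := by
              intro he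
              exact (List.nodup_cons.mp hnd).1 (he ▸ List.mem_map_of_mem hq)
            simp [this]
          exact congrArg (List.cons _) this.symm
      | succ j =>
          have hj : j < rest.length := by simpa using h
          simp only [List.getElem_cons_succ, List.set_cons_succ, List.map_cons]
          have hne : a.1 ≠ (rest[j]'hj).1 := by
            intro he
            exact (List.nodup_cons.mp hnd).1
              (he ▸ List.mem_map_of_mem (List.getElem_mem hj))
          rw [ih j hj (List.nodup_cons.mp hnd).2]
          have : (a.1 == (rest[j]'hj).1) = false := beq_eq_false_iff_ne.mpr hne
          simp [this]

-- lookup in out ++ [p]: first-match order makes p visible only on a miss in out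
theorem pv_get?_append_singleton (p : String × List String) :
    ∀ (out : List (String × List String)) (k : String),
      (PySem.Dict.mk (out ++ [p])).get? k
        = ((PySem.Dict.mk out).get? k).or (if (p.1 == k) = true then some p.2 else none) := by
  intro out
  induction out with
  | nil => intro k; simp [PySem.Dict.get?]
  | cons a rest ih =>
      intro k
      rw [List.cons_append, PySem.Dict.get?_mk_cons, PySem.Dict.get?_mk_cons]
      by_cases hak : (a.1 == k) = true
      · simp [hak]
      · have : (a.1 == k) = false := by cases h : (a.1 == k) <;> simp_all
        simp only [this, Bool.false_eq_true, if_neg, not_false_iff]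
        exact ih k

-- lookup through the fst-preserving extend-map: only key c changes, by ++ v
theorem pv_get?_extend (c : String) (v : List String) :
    ∀ (out : List (String × List String)) (k : String),
      (PySem.Dict.mk (out.map (fun q => if q.1 == c then (q.1, q.2 ++ v) else q))).get? k
        = if k = c then ((PySem.Dict.mk out).get? k).map (fun w => w ++ v)
          else (PySem.Dict.mk out).get? k := by
  intro out
  induction out with
  | nil => intro k; simp [PySem.Dict.get?]
  | cons a rest ih =>
      intro k
      by_cases hac : a.1 = c
      · have hb : (a.1 == c) = true := beq_iff_eq.mpr hac
        simp only [List.map_cons, hb, if_pos]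
        rw [PySem.Dict.get?_mk_cons, PySem.Dict.get?_mk_cons]
        by_cases hak : a.1 = k
        · have : (a.1 == k) = true := beq_iff_eq.mpr hak
          simp [← hak, hac]
        · have : (a.1 == k) = false := beq_eq_false_iff_ne.mpr hak
          simp only [this, Bool.false_eq_true, if_neg, not_false_iff]
          exact ih k
      · have hb : (a.1 == c) = false := beq_eq_false_iff_ne.mpr hac
        simp only [List.map_cons, hb, Bool.false_eq_true, if_neg, not_false_iff]
        rw [PySem.Dict.get?_mk_cons, PySem.Dict.get?_mk_cons]
        by_cases hak : a.1 = k
        · have hbk : (a.1 == k) = true := beq_iff_eq.mpr hak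
          have hkc : ¬ k = c := fun h => hac (hak.trans h)
          simp [hbk, hkc]
        · have hbk : (a.1 == k) = false := beq_eq_false_iff_ne.mpr hak
          simp only [hbk, Bool.false_eq_true, if_neg, not_false_iff]
          exact ih k

-- characterisation of B's grouping fold from any state satisfying the invariant
theorem pv_fold_char :
    ∀ (s : List (String × List String)) (out : List (String × List String))
      (pos : PySem.Dict String Nat), pvInvB out pos →
      (s.foldl pvStepB (out, pos)).1
        = (PySem.Set.update (out.map Prod.fst) (s.map Prod.fst)).map
            (fun k => (k, (PySem.Dict.mk out).getD k []
                ++ (s.filter (fun q => q.1 == k)).flatMap Prod.snd)) := by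
  intro s
  induction s with
  | nil =>
      intro out pos hinv
      simp only [List.foldl_nil, List.map_nil, PySem.Set.update_nil, List.filter_nil,
        List.flatMap_nil, List.append_nil]
      have hnd' : (PySem.Dict.mk out).keys.Nodup := by
        simpa [PySem.Dict.keys] using hinv.1
      have h := PySem.Dict.items_eq_map_keys (PySem.Dict.mk out) hnd' ([] : List String)
      have hkeys : (PySem.Dict.mk out).keys = out.map Prod.fst := rfl
      have hitems : (PySem.Dict.mk out).items = out := rfl
      rw [hkeys, hitems] at h
      exact h
  | cons p s ih =>
      intro out pos hinv
      obtain ⟨hnd, hcont, hidx⟩ := hinv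
      simp only [List.foldl_cons]
      cases hg : pos.get? p.1 with
      | some i =>
          obtain ⟨hi, hkey⟩ := hidx p.1 i hg
          have hmem : p.1 ∈ out.map Prod.fst := hkey ▸ List.mem_map_of_mem (List.getElem_mem hi)
          have hgetD : out.getD i (p.1, []) = out[i]'hi := List.getD_eq_getElem out (p.1, []) hi
          have hstep : pvStepB (out, pos) p
              = (out.map (fun q => if q.1 == p.1 then (q.1, q.2 ++ p.2) else q), pos) := by
            simp only [pvStepB, hg, hgetD]
            congr 1
            have := pv_set_extend p.2 out i hi hnd
            rw [← hkey, this, hkey]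
          rw [hstep]
          set out' := out.map (fun q => if q.1 == p.1 then (q.1, q.2 ++ p.2) else q) with hout'
          have hfst : out'.map Prod.fst = out.map Prod.fst := by
            rw [hout', List.map_map]
            apply List.map_congr_left
            intro q _
            by_cases h : q.1 = p.1 <;> simp [h]
          have hlen : out'.length = out.length := by simp [hout']
          have hinv' : pvInvB out' pos := by
            refine ⟨hfst ▸ hnd, fun k => hfst ▸ hcont k, fun k j hj => ?_⟩
            obtain ⟨hlt, hk⟩ := hidx k j hj
            refine ⟨hlen ▸ hlt, ?_⟩
            have : (out'[j]'(hlen ▸ hlt)).1 = (out[j]'hlt).1 := by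
              simp only [hout', List.getElem_map]
              by_cases h : (out[j]'hlt).1 = p.1 <;> simp [h]
            rw [this, hk]
          rw [ih out' pos hinv', hfst]
          have hset : PySem.Set.update (out.map Prod.fst) ((p :: s).map Prod.fst)
              = PySem.Set.update (out.map Prod.fst) (s.map Prod.fst) := by
            simp only [List.map_cons, PySem.Set.update_cons,
              PySem.Set.add_of_mem hmem]
          rw [hset]
          -- p.1 is present in out, so get? returns some value
          have hsome : ∃ w, (PySem.Dict.mk out).get? p.1 = some w := by
            have hc : (PySem.Dict.mk out).contains p.1 = true := by
              rw [PySem.Dict.contains_iff_mem_keys]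
              exact hmem
            rw [PySem.Dict.contains_eq_isSome_get?] at hc
            exact Option.isSome_iff_exists.mp hc
          obtain ⟨w, hw⟩ := hsome
          apply List.map_congr_left
          intro k _
          have hval : (PySem.Dict.mk out').getD k []
              = (PySem.Dict.mk out).getD k [] ++ (if (p.1 == k) = true then p.2 else []) := by
            rw [PySem.Dict.getD_eq_get?_getD, PySem.Dict.getD_eq_get?_getD,
              hout', pv_get?_extend p.1 p.2 out k]
            by_cases hk : k = p.1
            · have : (p.1 == k) = true := beq_iff_eq.mpr hk.symm
              simp [hk, hw]
            · have : (p.1 == k) = false := beq_eq_false_iff_ne.mpr (fun h => hk h.symm)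
              simp [hk, this]
          rw [hval]
          simp only [List.filter_cons]
          by_cases hpk : (p.1 == k) = true
          · simp only [hpk, if_pos, List.flatMap_cons, List.append_assoc]
          · have : (p.1 == k) = false := by
              cases h : (p.1 == k) <;> simp_all
            simp [this]
      | none =>
          have hnot : p.1 ∉ out.map Prod.fst := by
            intro hm
            have := (hcont p.1).mpr hm
            rw [PySem.Dict.contains_eq_isSome_get?, hg] at this
            simp at this
          have hstep : pvStepB (out, pos) p
              = (out ++ [p], pos.insert p.1 out.length) := by
            simp only [pvStepB, hg]
          rw [hstep]
          have hinv' : pvInvB (out ++ [p]) (pos.insert p.1 out.length) := by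
            refine ⟨?_, ?_, ?_⟩
            · cases p
              simp only [List.map_append, List.map_cons, List.map_nil]
              exact List.Nodup.append hnd (List.nodup_singleton _)
                (by simpa [List.disjoint_singleton] using hnot)
            · intro k
              rw [PySem.Dict.contains_insert]
              cases p with
              | mk pk pv =>
                simp only [List.map_append, List.map_cons, List.map_nil,
                  List.mem_append, List.mem_singleton, Bool.or_eq_true, beq_iff_eq]
                rw [← hcont k]
                tauto
            · intro k j hj
              rw [PySem.Dict.get?_insert] at hj
              by_cases hk : k = p.1
              · rw [if_pos hk] at hj
                have hje : j = out.length := by injection hj with h; omega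
                subst hje
                refine ⟨by simp, ?_⟩
                rw [List.getElem_append_right (le_refl out.length)]
                simp [hk]
              · rw [if_neg hk] at hj
                obtain ⟨hlt, hkey⟩ := hidx k j hj
                refine ⟨by simp; omega, ?_⟩
                rw [List.getElem_append_left hlt]
                exact hkey
          rw [ih (out ++ [p]) (pos.insert p.1 out.length) hinv']
          have h1 : (out ++ [p]).map Prod.fst = out.map Prod.fst ++ [p.1] := by simp
          have h2 : PySem.Set.update (out.map Prod.fst ++ [p.1]) (s.map Prod.fst)
              = PySem.Set.update (out.map Prod.fst) ((p :: s).map Prod.fst) := by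
            simp only [List.map_cons, PySem.Set.update_cons,
              PySem.Set.add_of_not_mem hnot]
          rw [h1, h2]
          apply List.map_congr_left
          intro k _
          -- lookup in out ++ [p] = lookup in out, except the fresh key p.1
          have hval : (PySem.Dict.mk (out ++ [p])).getD k []
              = (PySem.Dict.mk out).getD k [] ++ (if (p.1 == k) = true then p.2 else []) := by
            rw [PySem.Dict.getD_eq_get?_getD, PySem.Dict.getD_eq_get?_getD,
              pv_get?_append_singleton p out k]
            by_cases hk : (p.1 == k) = true
            · have hkm : k = p.1 := (beq_iff_eq.mp hk).symm
              have hnone : (PySem.Dict.mk out).get? k = none := by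
                rw [PySem.Dict.get?_eq_none_iff_not_mem_keys]
                exact fun hm => hnot (hkm ▸ hm)
              simp [hk, hnone]
            · have hkf : (p.1 == k) = false := by
                cases h : (p.1 == k) <;> simp_all
              simp [hkf]
          rw [hval]
          simp only [List.filter_cons]
          by_cases hpk : (p.1 == k) = true
          · simp only [hpk, if_pos, List.flatMap_cons, List.append_assoc]
          · have : (p.1 == k) = false := by
              cases h : (p.1 == k) <;> simp_all
            simp [this]

-- on a nodup-key pair list, the grouped contribution for k is the dict's value at k
theorem pv_filter_flatMap_eq_getD (k : String) :
    ∀ (l : List (String × List String)), (l.map Prod.fst).Nodup →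
      (l.filter (fun p => p.1 == k)).flatMap Prod.snd
        = (PySem.Dict.mk l).getD k [] := by
  intro l
  induction l with
  | nil => intro _; simp [PySem.Dict.getD, PySem.Dict.get?]
  | cons p l ih =>
      intro hnd
      rw [PySem.Dict.getD_eq_get?_getD, PySem.Dict.get?_mk_cons]
      simp only [List.filter_cons]
      by_cases h : p.1 = k
      · subst h
        have : l.filter (fun q => q.1 == p.1) = [] := by
          apply List.filter_eq_nil_iff.mpr
          intro q hq hb
          exact (List.nodup_cons.mp hnd).1
            ((beq_iff_eq.mp hb) ▸ List.mem_map_of_mem hq)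
        simp [this]
      · have hb : (p.1 == k) = false := beq_eq_false_iff_ne.mpr h
        simp only [hb, if_neg, Bool.false_eq_true, not_false_iff]
        rw [ih (List.nodup_cons.mp hnd).2, PySem.Dict.getD_eq_get?_getD]

-- ===== VERDICT (by name: the statement is the Claim_ definition above) =====
theorem merge_section_dicts_spec : Claim_equal_merge_section_dicts := by
  intro sec1 sec2 _
  unfold Spec_merge_section_dicts
  -- name the two input dicts and the canonical merged form
  have hnd1 : (PySem.Dict.ofList sec1).keys.Nodup := PySem.Dict.nodup_keys_ofList sec1
  have hnd2 : (PySem.Dict.ofList sec2).keys.Nodup := PySem.Dict.nodup_keys_ofList sec2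
  set d1 := PySem.Dict.ofList sec1 with hd1
  set d2 := PySem.Dict.ofList sec2 with hd2
  set gk : String → List String := fun k => d1.getD k [] ++ d2.getD k [] with hgk
  set K := PySem.Set.ofList (d1.keys ++ d2.keys) with hK
  have hKnd : K.Nodup := PySem.Set.nodup_ofList _
  have hdedup : PySem.List.dedup (d1.keys ++ d2.keys) = K := PySem.List.dedup_eq_ofList _
  -- ---- A's side: items = K.map (k, gk k) ----
  have hA0 : merge_section_dicts sec1 sec2
      = ((PySem.List.dedup (d1.keys ++ d2.keys)).foldl (fun merged key =>
          let m1 := merged.insert key ([] : List String)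
          let m2 := if d1.contains key then m1.modify key [] (fun l => l ++ d1.getD key []) else m1
          if d2.contains key then m2.modify key [] (fun l => l ++ d2.getD key []) else m2)
        PySem.Dict.empty).items := rfl
  have hbody : (fun (merged : PySem.Dict String (List String)) key =>
      let m1 := merged.insert key ([] : List String)
      let m2 := if d1.contains key then m1.modify key [] (fun l => l ++ d1.getD key []) else m1
      if d2.contains key then m2.modify key [] (fun l => l ++ d2.getD key []) else m2)
      = fun m k => m.insert k (gk k) := by
    funext m k
    by_cases hc1 : d1.contains k <;> by_cases hc2 : d2.contains k <;>
      simp [hc1, hc2, hgk, PySem.Dict.modify, PySem.Dict.getD_insert_self,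
        PySem.Dict.insert_insert_self, PySem.Dict.getD_of_not_contains]
  have hAfold := PySem.Dict.items_foldl_insert_fresh (d := PySem.Dict.empty) (l := K)
      (k := fun a => a) (v := gk)
      (fun k _ => PySem.Dict.contains_empty k) (by simpa using hKnd)
  simp only [] at hAfold
  have hA : merge_section_dicts sec1 sec2 = K.map (fun k => (k, gk k)) := by
    rw [hA0, hbody, hdedup, hAfold]
    simp [PySem.Dict.empty]
  -- ---- B's side: the grouping fold produces the same list, then dict(out) keeps it ----
  have hinv0 : pvInvB [] PySem.Dict.empty := by
    refine ⟨List.nodup_nil, fun k => ?_, fun k i hk => ?_⟩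
    · simp [PySem.Dict.contains_empty]
    · rw [PySem.Dict.get?_empty] at hk; exact absurd hk (by simp)
  have hstreamfst : (d1.items ++ d2.items).map Prod.fst = d1.keys ++ d2.keys := by
    simp only [List.map_append, PySem.Dict.keys]
  have hBout : ((d1.items ++ d2.items).foldl pvStepB ([], PySem.Dict.empty)).1
      = K.map (fun k => (k, gk k)) := by
    rw [pv_fold_char (d1.items ++ d2.items) [] PySem.Dict.empty hinv0]
    simp only [List.map_nil, hstreamfst, PySem.Set.update_nil_left, ← hK]
    apply List.map_congr_left
    intro k _
    have e1 : (d1.items.filter (fun q => q.1 == k)).flatMap Prod.snd = d1.getD k [] := by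
      rw [pv_filter_flatMap_eq_getD k d1.items hnd1]
    have e2 : (d2.items.filter (fun q => q.1 == k)).flatMap Prod.snd = d2.getD k [] := by
      rw [pv_filter_flatMap_eq_getD k d2.items hnd2]
    simp only [List.filter_append, List.flatMap_append, e1, e2, hgk]
    simp [PySem.Dict.getD, PySem.Dict.get?]
  have hB0 : merge_section_dicts_alt sec1 sec2
      = (PySem.Dict.ofList ((d1.items ++ d2.items).foldl pvStepB ([], PySem.Dict.empty)).1).items := rfl
  have hLnd : ((K.map (fun k => (k, gk k))).map Prod.fst).Nodup := by
    rw [List.map_map]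
    have hcomp : (Prod.fst ∘ fun k => (k, gk k)) = fun k : String => k := rfl
    rw [hcomp]
    simpa using hKnd
  have hBfold := PySem.Dict.items_foldl_insert_fresh (d := PySem.Dict.empty)
      (l := K.map (fun k => (k, gk k))) (k := Prod.fst) (v := Prod.snd)
      (fun p _ => PySem.Dict.contains_empty p.1) hLnd
  have hB : merge_section_dicts_alt sec1 sec2 = K.map (fun k => (k, gk k)) := by
    rw [hB0, hBout]
    show ((K.map (fun k => (k, gk k))).foldl
        (fun d p => d.insert p.1 p.2) PySem.Dict.empty).items = _
    rw [hBfold]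
    simp [PySem.Dict.empty]
  rw [hA, hB]
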